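-- pv_equiv track=rewrite | github.com/eyereasoner/eye | logos/cases/aristotle_reductio_sqrt2.py | sqrt2_rational_contradiction_exists
-- ===== SOURCE A (Python) =====
-- import math
--
-- def sqrt2_rational_contradiction_exists(limit_q: int = 2000) -> bool:
--     """
--     Search for coprime integers p, q (1 <= q <= limit_q) s.t. p^2 = 2 q^2.
--     If found, returns True (which would indicate a contradiction of mathematics).
--     We expect to find none.
--     """
--     for q in range(1, limit_q + 1):
--         m = 2*q*q
--         p = math.isqrt(m)
--         if p*p == m:
--             # A candidate; check if coprime
--             if math.gcd(p, q) == 1: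
--                 # This would contradict the theorem (and Euclid) — should never happen.
--                 return True
--     return False
-- ===== SOURCE B (Python) =====
-- import math
--
-- def sqrt2_rational_contradiction_exists(limit_q: int = 2000) -> bool:
--     """
--     Search for coprime integers p, q (1 <= q <= limit_q) s.t. p^2 = 2 q^2.
--     Walks the equation over the numerator p (with q derived from p), instead of
--     over the denominator q.
--     """
--     if limit_q < 1:
--         return False  # no admissible denominator q
--     for p in range(1, math.isqrt(2 * limit_q * limit_q) + 1):
--         if p * p % 2 == 1:
--             continue  # p^2 odd can never equal 2*q^2
--         h = p * p // 2
--         q = math.isqrt(h)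
--         if q * q == h and 1 <= q <= limit_q and math.gcd(p, q) == 1:
--             return True
--     return False
-- ===== Notes on version B (the rewrite author's own statement) =====
-- stated objective: alternative
-- what changed: B searches over the numerator p up to isqrt(2*limit_q^2), deriving q = isqrt(p^2/2) and checking q^2 == p^2//2, instead of A's loop over the denominator q deriving p = isqrt(2*q^2).
import Mathlib
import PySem

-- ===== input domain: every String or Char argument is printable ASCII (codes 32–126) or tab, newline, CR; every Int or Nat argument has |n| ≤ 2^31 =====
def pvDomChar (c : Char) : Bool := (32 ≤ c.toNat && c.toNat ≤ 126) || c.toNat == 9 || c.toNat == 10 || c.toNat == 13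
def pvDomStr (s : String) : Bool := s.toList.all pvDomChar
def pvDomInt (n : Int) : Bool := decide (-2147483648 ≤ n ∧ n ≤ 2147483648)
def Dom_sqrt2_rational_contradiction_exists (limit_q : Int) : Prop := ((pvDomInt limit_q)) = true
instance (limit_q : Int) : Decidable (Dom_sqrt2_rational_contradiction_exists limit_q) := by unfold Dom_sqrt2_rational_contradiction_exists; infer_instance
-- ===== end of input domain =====

-- B searches over the numerator p (q derived from p) instead of A's loop over the
-- denominator q (p derived from q); same return value everywhere (always False).

-- ===== PORT A =====
-- math.isqrt on a nonnegative int (both ports only apply it to nonnegative values)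
def pyIsqrt (m : Int) : Int := (m.toNat.sqrt : Int)

def sqrt2A_loop (limit_q : Int) : List Int → Bool
  | [] => false
  | q :: rest =>
    let m := 2 * q * q
    let p := pyIsqrt m
    if p * p = m then
      if Int.gcd p q = 1 then true
      else sqrt2A_loop limit_q rest
    else sqrt2A_loop limit_q rest

def sqrt2_rational_contradiction_exists (limit_q : Int) : Bool :=
  sqrt2A_loop limit_q (PySem.List.pyRange 1 (limit_q + 1) 1)

-- ===== PORT B =====
def sqrt2B_loop (limit_q : Int) : List Int → Bool
  | [] => false
  | p :: rest =>
    if PySem.Int.mod (p * p) 2 = 1 then sqrt2B_loop limit_q rest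
    else
      let h := PySem.Int.floordiv (p * p) 2
      let q := pyIsqrt h
      if q * q = h ∧ 1 ≤ q ∧ q ≤ limit_q ∧ Int.gcd p q = 1 then true
      else sqrt2B_loop limit_q rest

def sqrt2_rational_contradiction_exists_alt (limit_q : Int) : Bool :=
  if limit_q < 1 then false
  else sqrt2B_loop limit_q (PySem.List.pyRange 1 (pyIsqrt (2 * limit_q * limit_q) + 1) 1)

-- ===== PRECONDITION & SPEC =====
def Spec_sqrt2_rational_contradiction_exists (limit_q : Int) (out : Bool) : Prop := out = sqrt2_rational_contradiction_exists_alt limit_q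
instance (limit_q : Int) (out : Bool) : Decidable (Spec_sqrt2_rational_contradiction_exists limit_q out) := by unfold Spec_sqrt2_rational_contradiction_exists; infer_instance

-- ===== CLAIM (what is proved, stated in full; the proofs are below) =====
def Claim_equal_sqrt2_rational_contradiction_exists : Prop := ∀ (limit_q : Int), Dom_sqrt2_rational_contradiction_exists limit_q → Spec_sqrt2_rational_contradiction_exists limit_q (sqrt2_rational_contradiction_exists limit_q)

-- ===== LEMMAS AND PROOFS =====

-- √2 is irrational, in the form both loops need: no naturals p, q with q ≠ 0 and p² = 2q².
theorem nat_sq_ne_two_mul_sq (q : ℕ) (hq : q ≠ 0) : ∀ p : ℕ, p * p ≠ 2 * (q * q) := by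
  induction q using Nat.strong_induction_on with
  | _ q ih =>
    intro p hpq
    have hdvd : 2 ∣ p := by
      have : (2 : ℕ).Prime := Nat.prime_two
      have h2 : 2 ∣ p * p := ⟨q * q, hpq⟩
      rcases (Nat.Prime.dvd_mul this).mp h2 with h | h <;> exact h
    obtain ⟨k, rfl⟩ := hdvd
    have hq2 : q * q = 2 * (k * k) := by nlinarith
    have hk0 : k ≠ 0 := by
      rintro rfl
      simp at hq2
      exact hq (by nlinarith)
    have hkq : k < q := by nlinarith [Nat.pos_of_ne_zero hk0, Nat.pos_of_ne_zero hq]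
    exact ih k hkq hk0 q hq2

theorem int_sq_ne_two_mul_sq (p q : ℤ) (hq : 1 ≤ q) : p * p ≠ 2 * (q * q) := by
  intro h
  have hn : p.natAbs * p.natAbs = 2 * (q.natAbs * q.natAbs) := by
    have := congrArg Int.natAbs h
    simpa [Int.natAbs_mul] using this
  exact nat_sq_ne_two_mul_sq q.natAbs (by omega) p.natAbs hn

theorem sqrt2A_loop_false (limit_q : Int) (l : List Int) (hl : ∀ q ∈ l, 1 ≤ q) :
    sqrt2A_loop limit_q l = false := by
  induction l with
  | nil => rfl
  | cons q rest ih =>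
    have hq : 1 ≤ q := hl q (by simp)
    have hrest : ∀ x ∈ rest, 1 ≤ x := fun x hx => hl x (by simp [hx])
    simp only [sqrt2A_loop]
    have hne : pyIsqrt (2 * q * q) * pyIsqrt (2 * q * q) ≠ 2 * q * q := by
      intro h
      exact int_sq_ne_two_mul_sq _ q hq (by linarith [h, mul_assoc (2:ℤ) q q]  )
    rw [if_neg hne]
    exact ih hrest

theorem sqrt2B_loop_false (limit_q : Int) (l : List Int) (hl : ∀ p ∈ l, 1 ≤ p) :
    sqrt2B_loop limit_q l = false := by
  induction l with
  | nil => rfl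
  | cons p rest ih =>
    have hp : 1 ≤ p := hl p (by simp)
    have hrest : ∀ x ∈ rest, 1 ≤ x := fun x hx => hl x (by simp [hx])
    simp only [sqrt2B_loop]
    split
    · exact ih hrest
    · rename_i hodd
      have hcond : ¬ (pyIsqrt (PySem.Int.floordiv (p * p) 2) * pyIsqrt (PySem.Int.floordiv (p * p) 2) =
          PySem.Int.floordiv (p * p) 2 ∧ 1 ≤ pyIsqrt (PySem.Int.floordiv (p * p) 2) ∧
          pyIsqrt (PySem.Int.floordiv (p * p) 2) ≤ limit_q ∧
          Int.gcd p (pyIsqrt (PySem.Int.floordiv (p * p) 2)) = 1) := by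
        rintro ⟨hsq, hq1, -, -⟩
        -- p*p is even (the odd case was skipped), so 2 * (p*p // 2) = p*p
        have hmod : PySem.Int.mod (p * p) 2 = 0 := by
          have h0 : 0 ≤ PySem.Int.mod (p * p) 2 := PySem.Int.mod_nonneg (p * p) (by norm_num)
          have h1 : PySem.Int.mod (p * p) 2 < 2 := PySem.Int.mod_lt (p * p) (by norm_num)
          omega
        have hfd := PySem.Int.floordiv_mul_add_mod (p * p) 2
        set q := pyIsqrt (PySem.Int.floordiv (p * p) 2) with hqdef
        have : p * p = 2 * (q * q) := by rw [← hsq] at hfd; rw [hmod] at hfd; linarith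
        exact int_sq_ne_two_mul_sq p q hq1 this
      rw [if_neg hcond]
      exact ih hrest

-- ===== VERDICT (by name: the statement is the Claim_ definition above) =====
theorem sqrt2_rational_contradiction_exists_spec : Claim_equal_sqrt2_rational_contradiction_exists := by
  intro limit_q _
  unfold Spec_sqrt2_rational_contradiction_exists
  unfold sqrt2_rational_contradiction_exists sqrt2_rational_contradiction_exists_alt
  rw [sqrt2A_loop_false _ _ (fun x hx => ((PySem.List.mem_pyRange_one).mp hx).1)]
  split
  · rfl
  · rw [sqrt2B_loop_false _ _ (fun x hx => ((PySem.List.mem_pyRange_one).mp hx).1)]
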